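-- pv_equiv track=rewrite | github.com/manwar/perlweeklychallenge-club | challenge-320/sgreen/python/ch-2.py | sum_difference
-- ===== SOURCE A (Python) =====
-- def sum_difference(ints: list) -> int:
--     """Calculate the absolute difference between digit sum and element
--     sum of the given list.
--
--     Args:
--         ints (list): A list of positive integers
--
--     Returns:
--         int: The absolute difference.
--     """
--     # Check we are only given positive integers
--     if any(i < 1 for i in ints):
--         raise ValueError('Only positive integers allowed')
--
--     difference = 0
--     for i in ints:
--         # Single digit integers have no difference
--         if i > 9:
--             # Calculate the difference between the number and the sum of the
--             #  individual digits
--             difference += i - sum(int(d) for d in str(i))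
--
--     return abs(difference)
-- ===== SOURCE B (Python) =====
-- def sum_difference(ints: list) -> int:
--     """Absolute difference between element sum and digit sum of the list.
--
--     Uses the casting-out-nines identity n - digitsum(n) = 9 * (n//10 + n//100 + ...),
--     so no digit strings are ever built: the answer is 9 times the sum of all
--     truncated quotients of the elements.
--     """
--     if any(i < 1 for i in ints):
--         raise ValueError('Only positive integers allowed')
--
--     total = 0
--     for n in ints:
--         m = n // 10
--         while m > 0:
--             total += m
--             m //= 10
--     return 9 * total
-- ===== Notes on version B (the rewrite author's own statement) =====
-- stated objective: faster
-- what changed: Replaces per-element string conversion and digit summation by the casting-out-nines identity n - digitsum(n) = 9*(n//10 + n//100 + ...): B never builds a digit string, it accumulates truncated quotients with integer division and returns 9 times their sum.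
import Mathlib
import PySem

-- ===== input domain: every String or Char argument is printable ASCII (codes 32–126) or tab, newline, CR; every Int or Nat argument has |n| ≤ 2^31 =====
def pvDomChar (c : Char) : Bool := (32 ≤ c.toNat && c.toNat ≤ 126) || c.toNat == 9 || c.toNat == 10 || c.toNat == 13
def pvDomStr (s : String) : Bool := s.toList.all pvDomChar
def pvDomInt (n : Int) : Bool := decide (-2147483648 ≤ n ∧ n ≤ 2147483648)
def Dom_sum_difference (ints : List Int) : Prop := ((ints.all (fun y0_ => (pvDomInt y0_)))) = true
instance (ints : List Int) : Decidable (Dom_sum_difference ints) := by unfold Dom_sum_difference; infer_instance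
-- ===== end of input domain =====

-- B replaces A's per-element string-digit summation by the casting-out-nines identity
-- (9 * sum of truncated quotients, pure integer arithmetic, no digit strings); objective: faster (constant factor, measured).


-- ===== PORT A =====
-- int(d) for a one-character string d (always a decimal digit here)
def pvCharInt (c : Char) : Int := (PySem.Int.ofChars? [c]).getD 0

-- sum(int(d) for d in str(i))
def pvDigitSum (i : Int) : Int :=
  ((PySem.Int.toStr i).toList).foldl (fun a c => a + pvCharInt c) 0

def sum_difference (ints : List Int) : Int :=
  -- 'if any(i < 1 …): raise ValueError' is excluded by Pre_sum_difference
  let difference :=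
    ints.foldl (fun acc i => if i > 9 then acc + (i - pvDigitSum i) else acc) 0
  |difference|

-- ===== PORT B =====
-- the inner 'while m > 0: total += m; m //= 10'
def pvCollect (m : Int) (acc : Int) : Int :=
  if _h : 0 < m then pvCollect (PySem.Int.floordiv m 10) (acc + m) else acc
termination_by m.toNat
decreasing_by
  have h10 : PySem.Int.floordiv m 10 = m / 10 := Int.fdiv_eq_ediv_of_nonneg _ (by norm_num)
  rw [h10]; omega

def sum_difference_alt (ints : List Int) : Int :=
  -- the raising guard is excluded by Pre_sum_difference
  let total := ints.foldl (fun acc n => pvCollect (PySem.Int.floordiv n 10) acc) 0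
  9 * total

-- ===== PRECONDITION & SPEC =====
-- A raises ValueError whenever some element is < 1; exactly those inputs are excluded.
def Pre_sum_difference (ints : List Int) : Prop := ∀ i ∈ ints, 1 ≤ i
instance (ints : List Int) : Decidable (Pre_sum_difference ints) := by
  unfold Pre_sum_difference; infer_instance
def pvWitness_sum_difference : List Int := [1, 23, 4, 56]

def Spec_sum_difference (ints : List Int) (out : Int) : Prop := out = sum_difference_alt ints
instance (ints : List Int) (out : Int) : Decidable (Spec_sum_difference ints out) := by
  unfold Spec_sum_difference; infer_instance

-- ===== CLAIM (what is proved, stated in full; the proofs are below) =====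
def Claim_equal_sum_difference : Prop := ∀ (ints : List Int), Dom_sum_difference ints → Pre_sum_difference ints → Spec_sum_difference ints (sum_difference ints)

-- ===== LEMMAS AND PROOFS =====
-- arithmetic digit sum of a natural number
def pvDigN (n : Nat) : Nat :=
  if n = 0 then 0 else n % 10 + pvDigN (n / 10)
termination_by n
decreasing_by omega

-- sum of truncated quotients m + m/10 + m/100 + …
def pvPref (m : Nat) : Nat :=
  if m = 0 then 0 else m + pvPref (m / 10)
termination_by m
decreasing_by omega

theorem pvCharInt_digitChar (d : Nat) (hd : d < 10) :
    pvCharInt (Nat.digitChar d) = (d : Int) := by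
  interval_cases d <;> decide

theorem pv_foldl_charsum (l : List Char) (s : Int) :
    l.foldl (fun a c => a + pvCharInt c) s = s + (l.map pvCharInt).sum := by
  induction l generalizing s with
  | nil => simp
  | cons c cs ih => simp [List.foldl, ih]; ring

theorem pv_toDigitsCore_sum (fuel : Nat) :
    ∀ (n : Nat) (ds : List Char), n < fuel →
      ((Nat.toDigitsCore 10 fuel n ds).map pvCharInt).sum
        = (pvDigN n : Int) + ((ds.map pvCharInt).sum) := by
  induction fuel with
  | zero => intro n ds h; omega
  | succ f ih =>
    intro n ds h
    rw [Nat.toDigitsCore]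
    by_cases h0 : n / 10 = 0
    · simp only [h0]
      have hlt : n % 10 < 10 := Nat.mod_lt _ (by norm_num)
      have : pvDigN n = n % 10 := by
        rw [pvDigN]
        by_cases hn : n = 0
        · simp [hn]
        · rw [if_neg hn, h0, pvDigN]; simp
      simp [pvCharInt_digitChar _ hlt, this]
    · simp only [if_neg h0]
      have hn10 : 10 ≤ n := by
        by_contra hc
        exact h0 (Nat.div_eq_of_lt (by omega))
      have hrec : n / 10 < f := by
        have h1 : n / 10 < n := Nat.div_lt_self (by omega) (by norm_num)
        omega
      rw [ih (n / 10) _ hrec]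
      have hlt : n % 10 < 10 := Nat.mod_lt _ (by norm_num)
      have hdig : pvDigN n = n % 10 + pvDigN (n / 10) := by
        rw [pvDigN]; rw [if_neg (by omega)]
      simp [pvCharInt_digitChar _ hlt, hdig]
      ring

-- string digit sum = arithmetic digit sum, for nonnegative i
theorem pvDigitSum_eq (i : Int) (h : 0 ≤ i) : pvDigitSum i = (pvDigN i.toNat : Int) := by
  unfold pvDigitSum
  rw [PySem.Int.toList_toStr]
  unfold PySem.Int.toChars
  rw [if_neg (by omega)]
  unfold Nat.toDigits
  rw [pv_foldl_charsum, pv_toDigitsCore_sum (i.toNat + 1) i.toNat [] (by omega)]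
  simp

-- casting-out-nines identity: n - digitsum n = 9 * (n/10 + n/100 + …)
theorem pv_nines (n : Nat) : (n : Int) - (pvDigN n : Int) = 9 * (pvPref (n / 10) : Int) := by
  induction n using Nat.strong_induction_on with
  | _ n ih =>
    by_cases hn : n = 0
    · subst hn; simp [pvDigN, pvPref]
    · rw [pvDigN, if_neg hn]
      by_cases h0 : n / 10 = 0
      · rw [h0, pvDigN, if_pos rfl, pvPref, if_pos rfl]
        have := Nat.div_add_mod n 10
        push_cast
        omega
      · have hlt : n / 10 < n := Nat.div_lt_self (by omega) (by norm_num)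
        have := ih (n / 10) hlt
        rw [pvPref, if_neg h0]
        have hmod := Nat.div_add_mod n 10
        push_cast at this ⊢
        omega

-- pvCollect on a nonnegative argument equals acc + pvPref
theorem pvCollect_eq (m : Nat) : ∀ acc : Int, pvCollect (m : Int) acc = acc + (pvPref m : Int) := by
  induction m using Nat.strong_induction_on with
  | _ m ih =>
    intro acc
    rw [pvCollect]
    by_cases hm : m = 0
    · subst hm; simp [pvPref]
    · rw [dif_pos (by exact_mod_cast Nat.pos_of_ne_zero hm)]
      have hfd : PySem.Int.floordiv (m : Int) 10 = ((m / 10 : Nat) : Int) := by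
        rw [PySem.Int.floordiv, Int.fdiv_eq_ediv_of_nonneg _ (by norm_num)]
        exact_mod_cast (Int.natCast_div m 10).symm
      rw [hfd, ih (m / 10) (Nat.div_lt_self (Nat.pos_of_ne_zero hm) (by norm_num))]
      have : pvPref m = m + pvPref (m / 10) := by rw [pvPref, if_neg hm]
      rw [this]
      push_cast
      ring

-- per-element step equality, for 1 ≤ i
theorem pv_step (i : Int) (acc : Int) (h : 1 ≤ i) :
    (if i > 9 then acc + (i - pvDigitSum i) else acc)
      = acc + 9 * (pvPref (i.toNat / 10) : Int) := by
  by_cases hbig : i > 9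
  · rw [if_pos hbig, pvDigitSum_eq i (by omega)]
    have := pv_nines i.toNat
    have hi : ((i.toNat : Int)) = i := Int.toNat_of_nonneg (by omega)
    rw [hi] at this
    omega
  · rw [if_neg hbig]
    have h10 : i.toNat / 10 = 0 := Nat.div_eq_of_lt (by omega)
    rw [h10]
    simp [pvPref]

theorem pv_fold_key (ints : List Int) (h : ∀ i ∈ ints, 1 ≤ i) :
    ∀ a b : Int,
      ints.foldl (fun acc i => if i > 9 then acc + (i - pvDigitSum i) else acc) a
        = a + 9 * (ints.foldl (fun acc n => pvCollect (PySem.Int.floordiv n 10) acc) b - b) := by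
  induction ints with
  | nil => intro a b; simp
  | cons x xs ih =>
    intro a b
    have hx : 1 ≤ x := h x List.mem_cons_self
    have hxs : ∀ i ∈ xs, 1 ≤ i := fun i hi => h i (List.mem_cons_of_mem _ hi)
    simp only [List.foldl]
    rw [pv_step x a hx]
    have hfd : PySem.Int.floordiv x 10 = ((x.toNat / 10 : Nat) : Int) := by
      rw [PySem.Int.floordiv, Int.fdiv_eq_ediv_of_nonneg _ (by norm_num)]
      have hx' : ((x.toNat : Int)) = x := Int.toNat_of_nonneg (by omega)
      rw [← hx']
      exact_mod_cast (Int.natCast_div x.toNat 10).symm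
    rw [hfd, pvCollect_eq (x.toNat / 10) b,
        ih hxs (a + 9 * (pvPref (x.toNat / 10) : Int)) (b + (pvPref (x.toNat / 10) : Int))]
    ring

theorem pvCollect_ge (m acc : Int) : acc ≤ pvCollect m acc := by
  induction m, acc using pvCollect.induct with
  | case1 m acc h ih => rw [pvCollect, dif_pos h]; linarith
  | case2 m acc h => rw [pvCollect, dif_neg h]

theorem pv_fold_nonneg (ints : List Int) :
    0 ≤ ints.foldl (fun acc n => pvCollect (PySem.Int.floordiv n 10) acc) 0 := by
  have key : ∀ b : Int, b ≤ ints.foldl (fun acc n => pvCollect (PySem.Int.floordiv n 10) acc) b := by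
    induction ints with
    | nil => intro b; simp
    | cons x xs ih =>
      intro b
      simp only [List.foldl]
      exact le_trans (pvCollect_ge _ b) (ih _)
  exact key 0

-- ===== VERDICT (by name: the statement is the Claim_ definition above) =====
theorem sum_difference_spec : Claim_equal_sum_difference := by
  intro ints _ hpre
  unfold Spec_sum_difference sum_difference sum_difference_alt
  rw [pv_fold_key ints hpre 0 0]
  have hnn := pv_fold_nonneg ints
  simp only [sub_zero, zero_add]
  rw [abs_of_nonneg (by linarith)]
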